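-- pv_equiv track=rewrite | github.com/alemeds/checkpoint | estandar.py | verificar_version_compatible
-- ===== SOURCE A (Python) =====
-- from typing import Dict, List, Optional, Union
--
-- def verificar_version_compatible(version_detectada: str, versiones_homologadas: List[str]) -> bool:
--     """
--     Verifica si una versión detectada es compatible con las versiones homologadas
--     """
--     if not version_detectada or not versiones_homologadas:
--         return False
--
--     # Verificación exacta
--     if version_detectada in versiones_homologadas:
--         return True
--
--     # Verificación de compatibilidad por versión mayor
--     try:
--         partes_detectada = [int(x) for x in version_detectada.split('.')]
--
--         for version_homologada in versiones_homologadas: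
--             try:
--                 partes_homologada = [int(x) for x in version_homologada.split('.')]
--
--                 # Comparar versión mayor
--                 if len(partes_detectada) >= 1 and len(partes_homologada) >= 1:
--                     if partes_detectada[0] == partes_homologada[0]:
--                         # Misma versión mayor, verificar menor
--                         if len(partes_detectada) >= 2 and len(partes_homologada) >= 2:
--                             if partes_detectada[1] == partes_homologada[1]:
--                                 return True
--                         else:
--                             return True
--
--             except ValueError:
--                 continue
--
--     except ValueError:
--         pass
--
--     return False
-- ===== SOURCE B (Python) =====
-- def verificar_version_compatible(version_detectada, versiones_homologadas):
--     if not version_detectada: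
--         return False
--     if version_detectada in versiones_homologadas:
--         return True
--     try:
--         partes = [int(x) for x in version_detectada.split('.')]
--     except ValueError:
--         return False
--     # One pass: index the homologated versions by major version
--     wildcard_majors = set()          # majors homologated with a single-part entry
--     minors_by_major = {}             # major -> set of homologated minors
--     for vh in versiones_homologadas:
--         try:
--             ph = [int(x) for x in vh.split('.')]
--         except ValueError:
--             continue
--         if len(ph) == 1:
--             wildcard_majors.add(ph[0])
--         else:
--             minors_by_major.setdefault(ph[0], set()).add(ph[1])
--     major = partes[0]
--     if len(partes) == 1:
--         return major in wildcard_majors or major in minors_by_major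
--     return major in wildcard_majors or partes[1] in minors_by_major.get(major, set())
-- ===== Notes on version B (the rewrite author's own statement) =====
-- stated objective: alternative
-- what changed: A scans the homologated list with nested per-element length/major/minor comparisons and an early return; B makes one indexing pass building a wildcard-major set and a major-to-minors dict (skipping unparsable entries) and then answers with a single lookup on the parsed detected version.
import Mathlib
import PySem

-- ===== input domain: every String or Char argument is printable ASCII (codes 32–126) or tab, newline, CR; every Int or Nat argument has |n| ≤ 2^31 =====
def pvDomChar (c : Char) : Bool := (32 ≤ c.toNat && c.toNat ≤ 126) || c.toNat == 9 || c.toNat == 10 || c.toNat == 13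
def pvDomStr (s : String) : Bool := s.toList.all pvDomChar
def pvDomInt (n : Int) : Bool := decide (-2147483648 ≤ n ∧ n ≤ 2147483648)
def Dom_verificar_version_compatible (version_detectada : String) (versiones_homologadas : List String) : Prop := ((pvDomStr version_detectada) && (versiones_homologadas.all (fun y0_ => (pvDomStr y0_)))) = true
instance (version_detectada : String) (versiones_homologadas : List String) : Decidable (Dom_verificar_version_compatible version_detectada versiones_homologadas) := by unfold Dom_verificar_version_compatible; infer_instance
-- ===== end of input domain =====

-- B replaces A's linear scan with early return by a one-pass index (wildcard-major set +
-- major→minors dict) queried once; same O(n) cost, objective: idiomatic/alternative structure.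

-- ===== PORT A =====

-- [int(x) for x in s.split('.')] ; none = ValueError. split? with sep "." is always `some`
-- (sep ≠ ""), so the `getD []` default is never used.
def pvParse (s : String) : Option (List Int) :=
  ((PySem.Str.split? s ".").getD []).mapM PySem.Int.ofStr?

-- A's for-loop over versiones_homologadas (pd = parsed detected version)
def pvLoopA (pd : List Int) : List String → Bool
  | [] => false
  | vh :: rest =>
    match pvParse vh with
    | none => pvLoopA pd rest                  -- except ValueError: continue
    | some ph =>
      if 1 ≤ pd.length ∧ 1 ≤ ph.length then
        if PySem.List.pyGet? pd 0 = PySem.List.pyGet? ph 0 then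
          if 2 ≤ pd.length ∧ 2 ≤ ph.length then
            if PySem.List.pyGet? pd 1 = PySem.List.pyGet? ph 1 then true
            else pvLoopA pd rest
          else true
        else pvLoopA pd rest
      else pvLoopA pd rest

def verificar_version_compatible (version_detectada : String) (versiones_homologadas : List String) : Bool :=
  if version_detectada = "" || versiones_homologadas = [] then false
  else if versiones_homologadas.contains version_detectada then true
  else match pvParse version_detectada with
    | none => false                             -- except ValueError: pass; return False
    | some pd => pvLoopA pd versiones_homologadas

-- ===== PORT B =====

-- one indexing step of B's single pass: record a 1-part version as a wildcard major,
-- a ≥2-part version in the major → minors dict (setdefault + add)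
def pvStepB (acc : PySem.Set Int × PySem.Dict Int (PySem.Set Int)) (vh : String) :
    PySem.Set Int × PySem.Dict Int (PySem.Set Int) :=
  match pvParse vh with
  | none => acc                                -- except ValueError: continue
  | some [] => acc                             -- unreachable: split('.') never yields []
  | some [p0] => (PySem.Set.add acc.1 p0, acc.2)
  | some (p0 :: p1 :: _) =>
      (acc.1, acc.2.insert p0 (PySem.Set.add (acc.2.getD p0 PySem.Set.empty) p1))

def verificar_version_compatible_alt (version_detectada : String) (versiones_homologadas : List String) : Bool :=
  if version_detectada = "" then false
  else if versiones_homologadas.contains version_detectada then true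
  else match pvParse version_detectada with
    | none => false
    | some pd =>
      let idx := versiones_homologadas.foldl pvStepB (PySem.Set.empty, PySem.Dict.empty)
      match pd with
      | [] => false                            -- unreachable: split('.') never yields []
      | [major] => PySem.Set.contains idx.1 major || idx.2.contains major
      | major :: minor :: _ =>
          PySem.Set.contains idx.1 major ||
            PySem.Set.contains (idx.2.getD major PySem.Set.empty) minor

-- ===== PRECONDITION & SPEC =====
def Spec_verificar_version_compatible (version_detectada : String) (versiones_homologadas : List String) (out : Bool) : Prop := out = verificar_version_compatible_alt version_detectada versiones_homologadas
instance (version_detectada : String) (versiones_homologadas : List String) (out : Bool) : Decidable (Spec_verificar_version_compatible version_detectada versiones_homologadas out) := by unfold Spec_verificar_version_compatible; infer_instance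

-- ===== CLAIM (what is proved, stated in full; the proofs are below) =====
def Claim_equal_verificar_version_compatible : Prop := ∀ (version_detectada : String) (versiones_homologadas : List String), Dom_verificar_version_compatible version_detectada versiones_homologadas → Spec_verificar_version_compatible version_detectada versiones_homologadas (verificar_version_compatible version_detectada versiones_homologadas)

-- ===== LEMMAS AND PROOFS =====

-- A's per-element success condition, extracted from pvLoopA
def pvCondA (pd : List Int) (vh : String) : Bool :=
  match pvParse vh with
  | none => false
  | some ph =>
    if 1 ≤ pd.length ∧ 1 ≤ ph.length then
      if PySem.List.pyGet? pd 0 = PySem.List.pyGet? ph 0 then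
        if 2 ≤ pd.length ∧ 2 ≤ ph.length then
          decide (PySem.List.pyGet? pd 1 = PySem.List.pyGet? ph 1)
        else true
      else false
    else false

-- B's final query against an index accumulator
def pvQueryB (pd : List Int) (acc : PySem.Set Int × PySem.Dict Int (PySem.Set Int)) : Bool :=
  match pd with
  | [] => false
  | [major] => PySem.Set.contains acc.1 major || acc.2.contains major
  | major :: minor :: _ =>
      PySem.Set.contains acc.1 major ||
        PySem.Set.contains (acc.2.getD major PySem.Set.empty) minor

theorem pvLoopA_cons (pd : List Int) (vh : String) (rest : List String) :
    pvLoopA pd (vh :: rest) = (pvCondA pd vh || pvLoopA pd rest) := by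
  simp only [pvLoopA, pvCondA]
  cases pvParse vh with
  | none => simp
  | some ph =>
    dsimp only
    split_ifs <;> simp [*]

theorem pvQueryB_step (pd : List Int) (acc : PySem.Set Int × PySem.Dict Int (PySem.Set Int))
    (vh : String) :
    pvQueryB pd (pvStepB acc vh) = (pvCondA pd vh || pvQueryB pd acc) := by
  obtain ⟨w, m⟩ := acc
  simp only [pvStepB, pvCondA]
  cases hp : pvParse vh with
  | none => simp
  | some ph =>
    cases pd with
    | nil =>
      cases ph with
      | nil => simp [pvQueryB]
      | cons p0 t => cases t <;> simp [pvQueryB]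
    | cons major pdt =>
      cases ph with
      | nil => cases pdt <;> simp [pvQueryB]
      | cons p0 pht =>
        cases pht with
        | nil =>
          cases pdt with
          | nil =>
            simp [pvQueryB]
            cases hd : decide (major = p0) <;> cases PySem.Set.contains w major <;>
              simp_all
          | cons minor t =>
            simp [pvQueryB, PySem.List.pyGet?_ofNat']
            by_cases h : major = p0 <;> by_cases h2 : major ∈ w <;> simp [h, h2]
        | cons p1 phtt =>
          cases pdt with
          | nil =>
            simp [pvQueryB, PySem.List.pyGet?_ofNat', PySem.Dict.contains_insert]
            cases hd : decide (major = p0) <;> cases PySem.Set.contains w major <;>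
              cases PySem.Dict.contains m major <;> simp_all
          | cons minor t =>
            simp [pvQueryB, PySem.List.pyGet?_ofNat', PySem.Dict.getD_insert]
            by_cases hmaj : major = p0
            · subst hmaj
              simp
              cases hd : decide (minor = p1) <;> cases PySem.Set.contains w major <;> simp_all
            · simp [hmaj]

theorem pvQueryB_foldl (pd : List Int) (vhs : List String)
    (acc : PySem.Set Int × PySem.Dict Int (PySem.Set Int)) :
    pvQueryB pd (vhs.foldl pvStepB acc) = (pvLoopA pd vhs || pvQueryB pd acc) := by
  induction vhs generalizing acc with
  | nil => simp [pvLoopA]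
  | cons vh rest ih =>
    simp only [List.foldl_cons, ih, pvQueryB_step, pvLoopA_cons]
    cases pvCondA pd vh <;> cases pvLoopA pd rest <;> simp

theorem pvQueryB_empty (pd : List Int) :
    pvQueryB pd (PySem.Set.empty, PySem.Dict.empty) = false := by
  cases pd with
  | nil => rfl
  | cons a t => cases t <;> rfl

-- ===== VERDICT (by name: the statement is the Claim_ definition above) =====
theorem verificar_version_compatible_spec : Claim_equal_verificar_version_compatible := by
  intro vd vhs _
  unfold Spec_verificar_version_compatible
  unfold verificar_version_compatible verificar_version_compatible_alt
  by_cases hvd : vd = ""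
  · simp [hvd]
  · by_cases hm : vd ∈ vhs
    · have hne : vhs ≠ [] := by intro h; subst h; simp at hm
      simp [hvd, hm, hne]
    · by_cases hvhs : vhs = []
      · subst hvhs
        simp [hvd]
        cases hp : pvParse vd with
        | none => rfl
        | some pd => cases pd with
          | nil => rfl
          | cons a t => cases t <;> simp
      · simp [hvd, hm, hvhs]
        cases hp : pvParse vd with
        | none => rfl
        | some pd =>
          have h := pvQueryB_foldl pd vhs (PySem.Set.empty, PySem.Dict.empty)
          rw [pvQueryB_empty, Bool.or_false] at h
          cases pd with
          | nil => simp [pvQueryB] at h; simp [h]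
          | cons a t => cases t <;>
            (simp [pvQueryB] at h; simp [h])
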